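-- pv_equiv track=rewrite | github.com/santha22/PythonPrograms | GFG/Arrays/maximumLengthBitonicSubArray.py | bitonic
-- ===== SOURCE A (Python) =====
-- def bitonic(arr, n):
--     # code here
--     if n == 0:
--         return 0
--
--     maxi = 1
--     start = 0
--     nextStart = 0
--
--     j = 0
--     while j < n - 1:
--         while j < n - 1 and arr[j] <= arr[j + 1]:
--             j = j + 1
--
--         while j < n - 1 and arr[j] >= arr[j + 1]:
--             if j < n - 1 and arr[j] > arr[j + 1]:
--                 nextStart = j + 1
--
--             j = j + 1
--
--         maxi = max(maxi, j - (start - 1))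
--
--         start = nextStart
--
--     return maxi
-- ===== SOURCE B (Python) =====
-- def bitonic(arr, n):
--     # Table method: longest non-decreasing run ending at i, longest
--     # non-increasing run starting at i; answer = max(inc[i] + dec[i] - 1).
--     if n == 0:
--         return 0
--     xs = arr[:n]
--     inc = [1]
--     for i in range(1, n):
--         inc.append(inc[-1] + 1 if xs[i - 1] <= xs[i] else 1)
--     dec = [1]
--     for i in range(1, n):
--         j = n - 1 - i
--         dec.append(dec[-1] + 1 if xs[j] >= xs[j + 1] else 1)
--     dec.reverse()
--     best = 1
--     for i in range(n):
--         best = max(best, inc[i] + dec[i] - 1)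
--     return best
-- ===== Notes on version B (the rewrite author's own statement) =====
-- stated objective: alternative
-- what changed: A's single pointer-advancing pass over up/down mountains is replaced by the classic two-table method: inc[i] = longest non-decreasing run ending at i, dec[i] = longest non-increasing run starting at i, answer = max(inc[i]+dec[i]-1).
import Mathlib
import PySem

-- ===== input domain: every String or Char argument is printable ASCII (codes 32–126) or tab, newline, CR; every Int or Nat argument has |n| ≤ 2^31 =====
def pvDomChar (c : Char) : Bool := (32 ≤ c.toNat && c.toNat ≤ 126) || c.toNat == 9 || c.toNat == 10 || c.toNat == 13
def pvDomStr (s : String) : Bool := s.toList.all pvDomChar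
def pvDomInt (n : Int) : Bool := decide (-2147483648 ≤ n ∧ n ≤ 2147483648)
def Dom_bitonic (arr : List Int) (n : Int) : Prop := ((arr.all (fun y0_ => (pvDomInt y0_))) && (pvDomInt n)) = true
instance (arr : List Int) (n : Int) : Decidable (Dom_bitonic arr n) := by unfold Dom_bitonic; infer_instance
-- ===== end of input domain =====

-- B replaces A's single pointer-advancing mountain walk by the two-table
-- inc/dec method (alternative algorithm, same O(n) cost). Return values only;
-- neither program mutates its arguments.

-- ===== PORT A =====
-- Python `arr[j]` is read via PySem.List.pyGetD; under Pre_bitonic every index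
-- the loops touch is in range, so the default is never read (A raises
-- IndexError exactly on the inputs Pre_bitonic excludes).
-- Each while loop carries an explicit fuel argument that only makes the
-- recursion structural; the wrappers pass the exact loop measure
-- (n - 1 - j).toNat, so the guard `j < n - 1` always fails before fuel runs
-- out and each function is its Python loop step for step.

-- inner `while j < n-1 and arr[j] <= arr[j+1]`
def pvAscF (arr : List Int) (n : Int) : Nat → Int → Int
  | 0, j => j
  | fuel + 1, j =>
    if j < n - 1 ∧ PySem.List.pyGetD arr j 0 ≤ PySem.List.pyGetD arr (j + 1) 0 then
      pvAscF arr n fuel (j + 1)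
    else j

def pvAsc (arr : List Int) (n j : Int) : Int := pvAscF arr n (n - 1 - j).toNat j

-- inner `while j < n-1 and arr[j] >= arr[j+1]` (also updating nextStart)
def pvDescF (arr : List Int) (n : Int) : Nat → Int → Int → Int × Int
  | 0, j, ns => (j, ns)
  | fuel + 1, j, ns =>
    if j < n - 1 ∧ PySem.List.pyGetD arr j 0 ≥ PySem.List.pyGetD arr (j + 1) 0 then
      pvDescF arr n fuel (j + 1)
        (if j < n - 1 ∧ PySem.List.pyGetD arr j 0 > PySem.List.pyGetD arr (j + 1) 0 then j + 1 else ns)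
    else (j, ns)

def pvDesc (arr : List Int) (n j ns : Int) : Int × Int := pvDescF arr n (n - 1 - j).toNat j ns

-- outer `while j < n - 1`
def pvOuterF (arr : List Int) (n : Int) : Nat → Int → Int → Int → Int → Int
  | 0, maxi, _, _, _ => maxi
  | fuel + 1, maxi, start, ns, j =>
    if j < n - 1 then
      let j1 := pvAsc arr n j
      let p := pvDesc arr n j1 ns
      pvOuterF arr n fuel (max maxi (p.1 - (start - 1))) p.2 p.2 p.1
    else maxi

def bitonic (arr : List Int) (n : Int) : Int :=
  if n == 0 then 0
  else pvOuterF arr n (n - 1).toNat 1 0 0 0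

-- ===== PORT B =====
def bitonic_alt (arr : List Int) (n : Int) : Int :=
  if n == 0 then 0
  else
    let xs := PySem.List.slice arr none (some n)          -- xs = arr[:n]
    let inc := (PySem.List.pyRange 1 n 1).foldl
      (fun acc i =>
        acc ++ [if PySem.List.pyGetD xs (i - 1) 0 ≤ PySem.List.pyGetD xs i 0
                then PySem.List.pyGetD acc (-1) 0 + 1 else 1]) [1]
    let decRev := (PySem.List.pyRange 1 n 1).foldl
      (fun acc i =>
        let j := n - 1 - i
        acc ++ [if PySem.List.pyGetD xs j 0 ≥ PySem.List.pyGetD xs (j + 1) 0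
                then PySem.List.pyGetD acc (-1) 0 + 1 else 1]) [1]
    let dec := decRev.reverse
    (PySem.List.pyRange 0 n 1).foldl
      (fun best i => max best (PySem.List.pyGetD inc i 0 + PySem.List.pyGetD dec i 0 - 1)) 1

-- ===== PRECONDITION & SPEC =====
-- Pre_ excludes exactly the inputs with n > len(arr) on which A's indexing
-- raises IndexError (B raises there too) — except arr = [] with n = 1, where A
-- never indexes and both return 1, which stays inside.
def Pre_bitonic (arr : List Int) (n : Int) : Prop :=
  n ≤ arr.length ∨ (arr = [] ∧ n = 1)
instance (arr : List Int) (n : Int) : Decidable (Pre_bitonic arr n) := by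
  unfold Pre_bitonic; infer_instance

def pvWitness_bitonic : List Int × Int := ([1, 3, 2, 2, 0, 4], 6)

def Spec_bitonic (arr : List Int) (n : Int) (out : Int) : Prop := out = bitonic_alt arr n
instance (arr : List Int) (n : Int) (out : Int) : Decidable (Spec_bitonic arr n out) := by
  unfold Spec_bitonic; infer_instance

-- ===== CLAIM (what is proved, stated in full; the proofs are below) =====
def Claim_equal_bitonic : Prop := ∀ (arr : List Int) (n : Int),
  Dom_bitonic arr n → Pre_bitonic arr n → Spec_bitonic arr n (bitonic arr n)

-- ===== LEMMAS AND PROOFS =====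

-- proof-only definitions: per-index run lengths and the running maximum B computes
-- pvInc arr i = length of the longest non-decreasing run of arr ending at i
def pvInc (arr : List Int) (i : Int) : Int :=
  if h : 0 < i then
    if PySem.List.pyGetD arr (i - 1) 0 ≤ PySem.List.pyGetD arr i 0 then pvInc arr (i - 1) + 1 else 1
  else 1
termination_by i.toNat
decreasing_by omega

-- pvDec arr n i = length of the longest non-increasing run of arr[:n] starting at i
def pvDec (arr : List Int) (n i : Int) : Int :=
  if h : i < n - 1 then
    if PySem.List.pyGetD arr i 0 ≥ PySem.List.pyGetD arr (i + 1) 0 then pvDec arr n (i + 1) + 1 else 1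
  else 1
termination_by (n - 1 - i).toNat
decreasing_by omega

def pvG (arr : List Int) (n i : Int) : Int := pvInc arr i + pvDec arr n i - 1

-- max of pvG over indices j..n-1
def pvRmax (arr : List Int) (n j : Int) : Int :=
  if h : j < n - 1 then max (pvG arr n j) (pvRmax arr n (j + 1)) else pvG arr n j
termination_by (n - 1 - j).toNat
decreasing_by omega

theorem pvInc_base (arr : List Int) (i : Int) (h : i ≤ 0) : pvInc arr i = 1 := by
  rw [pvInc]; simp [show ¬ 0 < i by omega]

theorem pvInc_pos (arr : List Int) (i : Int) : 1 ≤ pvInc arr i := by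
  fun_induction pvInc with
  | case1 i h hle ih => omega
  | case2 i h hle => omega
  | case3 i h => omega

theorem pvDec_pos (arr : List Int) (n i : Int) : 1 ≤ pvDec arr n i := by
  fun_induction pvDec with
  | case1 i h hge ih => omega
  | case2 i h hge => omega
  | case3 i h => omega

theorem pvInc_succ (arr : List Int) (j : Int) (h0 : 0 ≤ j)
    (hle : PySem.List.pyGetD arr j 0 ≤ PySem.List.pyGetD arr (j + 1) 0) :
    pvInc arr (j + 1) = pvInc arr j + 1 := by
  rw [pvInc]
  simp only [add_sub_cancel_right]
  rw [dif_pos (by omega), if_pos hle]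

theorem pvInc_reset (arr : List Int) (j : Int) (h0 : 0 ≤ j)
    (hgt : PySem.List.pyGetD arr j 0 > PySem.List.pyGetD arr (j + 1) 0) :
    pvInc arr (j + 1) = 1 := by
  rw [pvInc]
  simp only [add_sub_cancel_right]
  rw [dif_pos (by omega), if_neg (by omega)]

theorem pvDec_succ (arr : List Int) (n j : Int) (hj : j < n - 1)
    (hge : PySem.List.pyGetD arr j 0 ≥ PySem.List.pyGetD arr (j + 1) 0) :
    pvDec arr n j = pvDec arr n (j + 1) + 1 := by
  rw [pvDec, dif_pos hj, if_pos hge]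

theorem pvDec_exit (arr : List Int) (n m : Int)
    (h : n - 1 ≤ m ∨ PySem.List.pyGetD arr m 0 < PySem.List.pyGetD arr (m + 1) 0) :
    pvDec arr n m = 1 := by
  rcases h with h | h
  · rw [pvDec, dif_neg (by omega)]
  · rw [pvDec]
    rcases lt_or_ge m (n - 1) with h2 | h2
    · rw [dif_pos h2, if_neg (by omega)]
    · rw [dif_neg (by omega)]

theorem pvInc_le (arr : List Int) (j i : Int) (h0 : 0 ≤ j) (hji : j ≤ i) :
    pvInc arr i ≤ pvInc arr j + (i - j) := by
  induction hk : (i - j).toNat using Nat.strong_induction_on generalizing i with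
  | _ k ih =>
    rcases eq_or_lt_of_le hji with rfl | hlt
    · omega
    · have hstep : pvInc arr i ≤ pvInc arr (i - 1) + 1 := by
        rw [pvInc, dif_pos (by omega)]
        have := pvInc_pos arr (i - 1)
        split <;> omega
      have := ih (i - 1 - j).toNat (by omega) (i - 1) (by omega) rfl
      omega

theorem pvDec_le (arr : List Int) (n i m : Int) (him : i ≤ m) (hm : m ≤ n - 1) :
    pvDec arr n i ≤ pvDec arr n m + (m - i) := by
  induction hk : (m - i).toNat using Nat.strong_induction_on generalizing i with
  | _ k ih =>
    rcases eq_or_lt_of_le him with rfl | hlt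
    · omega
    · have hstep : pvDec arr n i ≤ pvDec arr n (i + 1) + 1 := by
        rw [pvDec, dif_pos (by omega)]
        have := pvDec_pos arr n (i + 1)
        split <;> omega
      have := ih (m - (i + 1)).toNat (by omega) (i + 1) (by omega) rfl
      omega

-- what the ascent loop establishes: it stops at the end or at a strict drop,
-- and it extends the non-decreasing run
theorem pvAscF_ge (arr : List Int) (n : Int) :
    ∀ (fuel : Nat) (j : Int), j ≤ pvAscF arr n fuel j := by
  intro fuel
  induction fuel with
  | zero => intro j; exact le_refl j
  | succ fuel ih =>
    intro j
    simp only [pvAscF]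
    split
    · exact le_trans (by omega) (ih (j + 1))
    · exact le_refl j

theorem pvDescF_ge (arr : List Int) (n : Int) :
    ∀ (fuel : Nat) (j ns : Int), j ≤ (pvDescF arr n fuel j ns).1 := by
  intro fuel
  induction fuel with
  | zero => intro j ns; exact le_refl j
  | succ fuel ih =>
    intro j ns
    simp only [pvDescF]
    split
    · exact le_trans (by omega) (ih (j + 1) _)
    · exact le_refl j

-- one outer-loop iteration advances j by at least one
theorem pvAdvance (arr : List Int) (n j ns : Int) (hj : j < n - 1) :
    j + 1 ≤ (pvDesc arr n (pvAsc arr n j) ns).1 := by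
  obtain ⟨k, hk⟩ : ∃ k, (n - 1 - j).toNat = k + 1 := ⟨(n - 2 - j).toNat, by omega⟩
  by_cases hle : PySem.List.pyGetD arr j 0 ≤ PySem.List.pyGetD arr (j + 1) 0
  · have h1 : j + 1 ≤ pvAsc arr n j := by
      rw [pvAsc, hk]
      simp only [pvAscF]
      rw [if_pos ⟨hj, hle⟩]
      exact pvAscF_ge arr n k (j + 1)
    exact le_trans h1 (pvDescF_ge arr n _ _ _)
  · have h1 : pvAsc arr n j = j := by
      rw [pvAsc, hk]
      simp only [pvAscF]
      rw [if_neg (fun hc => hle hc.2)]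
    rw [h1]
    obtain ⟨k2, hk2⟩ : ∃ k2, (n - 1 - j).toNat = k2 + 1 := ⟨k, hk⟩
    rw [pvDesc, hk2]
    simp only [pvDescF]
    rw [if_pos ⟨hj, by omega⟩]
    exact pvDescF_ge arr n k2 (j + 1) _

-- what the ascent loop establishes: it stops at the end or at a strict drop,
-- and it extends the non-decreasing run
theorem pvAscF_spec (arr : List Int) (n : Int) :
    ∀ (fuel : Nat) (j : Int), (n - 1 - j).toNat ≤ fuel → 0 ≤ j → j ≤ n - 1 →
    pvAscF arr n fuel j ≤ n - 1 ∧
    (pvAscF arr n fuel j = n - 1 ∨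
      PySem.List.pyGetD arr (pvAscF arr n fuel j) 0 >
        PySem.List.pyGetD arr (pvAscF arr n fuel j + 1) 0) ∧
    pvInc arr (pvAscF arr n fuel j) = pvInc arr j + (pvAscF arr n fuel j - j) := by
  intro fuel
  induction fuel with
  | zero =>
    intro j hf h0 hj
    have hje : j = n - 1 := by omega
    simp only [pvAscF]
    exact ⟨hj, Or.inl hje, by omega⟩
  | succ fuel ih =>
    intro j hf h0 hj
    simp only [pvAscF]
    by_cases h : j < n - 1 ∧ PySem.List.pyGetD arr j 0 ≤ PySem.List.pyGetD arr (j + 1) 0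
    · rw [if_pos h]
      obtain ⟨i1, i2, i3⟩ := ih (j + 1) (by omega) (by omega) (by omega)
      have := pvAscF_ge arr n fuel (j + 1)
      refine ⟨i1, i2, ?_⟩
      rw [i3, pvInc_succ arr j h0 h.2]
      omega
    · rw [if_neg h]
      refine ⟨hj, ?_, by omega⟩
      rcases eq_or_lt_of_le hj with heq | hlt
      · exact Or.inl heq
      · exact Or.inr (by omega)

theorem pvAsc_spec (arr : List Int) (n j : Int) (h0 : 0 ≤ j) (hj : j ≤ n - 1) :
    pvAsc arr n j ≤ n - 1 ∧
    (pvAsc arr n j = n - 1 ∨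
      PySem.List.pyGetD arr (pvAsc arr n j) 0 > PySem.List.pyGetD arr (pvAsc arr n j + 1) 0) ∧
    pvInc arr (pvAsc arr n j) = pvInc arr j + (pvAsc arr n j - j) :=
  pvAscF_spec arr n (n - 1 - j).toNat j (le_refl _) h0 hj

-- what the descent loop establishes: it stops at the end or a strict rise,
-- nextStart keeps pvInc exact, and pvDec decreases one per step
theorem pvDescF_spec (arr : List Int) (n : Int) :
    ∀ (fuel : Nat) (j ns : Int), (n - 1 - j).toNat ≤ fuel → 0 ≤ ns → ns ≤ j →
    j ≤ n - 1 → pvInc arr j = j - ns + 1 →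
    j ≤ (pvDescF arr n fuel j ns).1 ∧ (pvDescF arr n fuel j ns).1 ≤ n - 1 ∧
    ((pvDescF arr n fuel j ns).1 = n - 1 ∨
      PySem.List.pyGetD arr ((pvDescF arr n fuel j ns).1) 0 <
        PySem.List.pyGetD arr ((pvDescF arr n fuel j ns).1 + 1) 0) ∧
    0 ≤ (pvDescF arr n fuel j ns).2 ∧ (pvDescF arr n fuel j ns).2 ≤ (pvDescF arr n fuel j ns).1 ∧
    pvInc arr ((pvDescF arr n fuel j ns).1)
      = (pvDescF arr n fuel j ns).1 - (pvDescF arr n fuel j ns).2 + 1 ∧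
    pvDec arr n j = pvDec arr n ((pvDescF arr n fuel j ns).1) + ((pvDescF arr n fuel j ns).1 - j) := by
  intro fuel
  induction fuel with
  | zero =>
    intro j ns hf h0 hnsj hj hinv
    have hje : j = n - 1 := by omega
    simp only [pvDescF]
    refine ⟨le_refl j, hj, Or.inl hje, h0, hnsj, hinv, by omega⟩
  | succ fuel ih =>
    intro j ns hf h0 hnsj hj hinv
    simp only [pvDescF]
    by_cases h : j < n - 1 ∧ PySem.List.pyGetD arr j 0 ≥ PySem.List.pyGetD arr (j + 1) 0
    · rw [if_pos h]
      by_cases hst : PySem.List.pyGetD arr j 0 > PySem.List.pyGetD arr (j + 1) 0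
      · rw [if_pos ⟨h.1, hst⟩]
        obtain ⟨i1, i2, i3, i4, i5, i6, i7⟩ :=
          ih (j + 1) (j + 1) (by omega) (by omega) (by omega) (by omega)
            (by rw [pvInc_reset arr j (by omega) hst]; omega)
        exact ⟨by omega, i2, i3, i4, i5, i6,
          by rw [pvDec_succ arr n j h.1 h.2, i7]; omega⟩
      · rw [if_neg (fun hc => hst hc.2)]
        obtain ⟨i1, i2, i3, i4, i5, i6, i7⟩ :=
          ih (j + 1) ns (by omega) h0 (by omega) (by omega)
            (by rw [pvInc_succ arr j (by omega) (by omega)]; omega)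
        exact ⟨by omega, i2, i3, i4, i5, i6,
          by rw [pvDec_succ arr n j h.1 h.2, i7]; omega⟩
    · rw [if_neg h]
      dsimp only
      refine ⟨le_refl j, hj, ?_, h0, hnsj, hinv, by omega⟩
      rcases eq_or_lt_of_le hj with heq | hlt
      · exact Or.inl heq
      · exact Or.inr (by omega)

theorem pvDesc_spec (arr : List Int) (n j ns : Int) (h0 : 0 ≤ ns) (hnsj : ns ≤ j)
    (hj : j ≤ n - 1) (hinv : pvInc arr j = j - ns + 1) :
    j ≤ (pvDesc arr n j ns).1 ∧ (pvDesc arr n j ns).1 ≤ n - 1 ∧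
    ((pvDesc arr n j ns).1 = n - 1 ∨
      PySem.List.pyGetD arr ((pvDesc arr n j ns).1) 0 <
        PySem.List.pyGetD arr ((pvDesc arr n j ns).1 + 1) 0) ∧
    0 ≤ (pvDesc arr n j ns).2 ∧ (pvDesc arr n j ns).2 ≤ (pvDesc arr n j ns).1 ∧
    pvInc arr ((pvDesc arr n j ns).1) = (pvDesc arr n j ns).1 - (pvDesc arr n j ns).2 + 1 ∧
    pvDec arr n j = pvDec arr n ((pvDesc arr n j ns).1) + ((pvDesc arr n j ns).1 - j) :=
  pvDescF_spec arr n (n - 1 - j).toNat j ns (le_refl _) h0 hnsj hj hinv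

-- the outer loop returns maxi as soon as the guard fails, whatever the fuel
theorem pvOuterF_stop (arr : List Int) (n : Int) (fuel : Nat) (maxi start ns j : Int)
    (h : ¬ j < n - 1) : pvOuterF arr n fuel maxi start ns j = maxi := by
  cases fuel with
  | zero => rfl
  | succ fuel => simp only [pvOuterF]; rw [if_neg h]

theorem pvRmax_unfold (arr : List Int) (n j : Int) (h : j < n - 1) :
    pvRmax arr n j = max (pvG arr n j) (pvRmax arr n (j + 1)) := by
  rw [pvRmax, dif_pos h]

theorem pvRmax_ge (arr : List Int) (n i j : Int) (hji : j ≤ i) (hi : i ≤ n - 1) :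
    pvG arr n i ≤ pvRmax arr n j := by
  revert hji
  fun_induction pvRmax arr n j with
  | case1 j h ih =>
    intro hji
    rcases eq_or_lt_of_le hji with rfl | hlt
    · exact le_max_left _ _
    · exact le_trans (ih (by omega)) (le_max_right _ _)
  | case2 j h =>
    intro hji
    have hij : i = j := by omega
    subst hij; exact le_refl (pvG arr n i)

theorem pvRmax_mono (arr : List Int) (n j m : Int) (hjm : j ≤ m) (hm : m ≤ n - 1) :
    pvRmax arr n m ≤ pvRmax arr n j := by
  revert hjm
  fun_induction pvRmax arr n j with
  | case1 j h ih =>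
    intro hjm
    rcases eq_or_lt_of_le hjm with rfl | hlt
    · rw [pvRmax_unfold arr n j h]
    · exact le_trans (ih (by omega)) (le_max_right _ _)
  | case2 j h =>
    intro hjm
    have hmj : m = j := by omega
    subst hmj; rw [pvRmax, dif_neg h]

theorem pvRmax_le (arr : List Int) (n j m v : Int) (hjm : j ≤ m) (hm : m ≤ n - 1)
    (hb : ∀ i, j ≤ i → i < m → pvG arr n i ≤ v) :
    pvRmax arr n j ≤ max v (pvRmax arr n m) := by
  revert hjm hb
  fun_induction pvRmax arr n j with
  | case1 j h ih =>
    intro hjm hb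
    rcases eq_or_lt_of_le hjm with rfl | hlt
    · rw [pvRmax_unfold arr n j h]; exact le_max_right _ _
    · apply max_le
      · exact le_trans (hb j (le_refl j) hlt) (le_max_left v (pvRmax arr n m))
      · exact ih (by omega) (fun i hi1 hi2 => hb i (by omega) hi2)
  | case2 j h =>
    intro hjm hb
    have hmj : m = j := by omega
    subst hmj
    rw [pvRmax, dif_neg h]
    exact le_max_right v (pvG arr n m)

-- the outer loop computes max maxi (pvRmax j), given the run invariant
theorem pvOuter_eq (arr : List Int) (n : Int) :
    ∀ (fuel : Nat) (maxi start j : Int), (n - 1 - j).toNat ≤ fuel → 0 ≤ start →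
    start ≤ j → j < n - 1 → pvInc arr j = j - start + 1 →
    pvOuterF arr n fuel maxi start start j = max maxi (pvRmax arr n j) := by
  intro fuel
  induction fuel with
  | zero => intro maxi start j hf h0 hsj hj hinv; omega
  | succ fuel ih =>
    intro maxi start j hf h0 hsj hj hinv
    obtain ⟨a1, a2, a3⟩ := pvAsc_spec arr n j (by omega) (by omega)
    have hgej1 : j ≤ pvAsc arr n j := pvAscF_ge arr n _ j
    obtain ⟨d1, d2, d3, d4, d5, d6, d7⟩ :=
      pvDesc_spec arr n (pvAsc arr n j) start h0 (by omega) a1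
        (by rw [a3, hinv]; omega)
    have hadv := pvAdvance arr n j start hj
    obtain ⟨j1, hj1def⟩ : ∃ x, pvAsc arr n j = x := ⟨_, rfl⟩
    rw [hj1def] at a1 a2 a3 hgej1 hadv d1 d2 d3 d4 d5 d6 d7
    obtain ⟨j2, ns2, hpdef⟩ : ∃ x y, pvDesc arr n j1 start = (x, y) := ⟨_, _, rfl⟩
    rw [hpdef] at hadv d1 d2 d3 d4 d5 d6 d7
    dsimp only at hadv d1 d2 d3 d4 d5 d6 d7
    have hdecj2 : pvDec arr n j2 = 1 := pvDec_exit arr n j2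
      (by rcases d3 with h | h
          · exact Or.inl (by omega)
          · exact Or.inr h)
    have hIj1 : pvInc arr j1 = j1 - start + 1 := by rw [a3, hinv]; omega
    have hpeak : pvG arr n j1 = j2 - start + 1 := by
      unfold pvG
      rw [hIj1]
      omega
    have hbound : ∀ i, j ≤ i → i ≤ j2 → pvG arr n i ≤ j2 - start + 1 := by
      intro i hi1 hi2
      have hI := pvInc_le arr j i (by omega) hi1
      have hD := pvDec_le arr n i j2 hi2 d2
      unfold pvG
      omega
    simp only [pvOuterF]
    rw [if_pos hj]
    simp only [hj1def, hpdef]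
    rcases lt_or_ge j2 (n - 1) with hend | hend
    · rw [ih (max maxi (j2 - (start - 1))) ns2 j2 (by omega) d4 d5 hend d6]
      apply le_antisymm
      · apply max_le (max_le (le_max_left _ _) ?_)
          (le_trans (pvRmax_mono arr n j j2 (by omega) (by omega)) (le_max_right _ _))
        have heq : j2 - (start - 1) = pvG arr n j1 := by omega
        rw [heq]
        exact le_trans (pvRmax_ge arr n j1 j (by omega) (by omega)) (le_max_right _ _)
      · apply max_le (le_trans (le_max_left _ _) (le_max_left _ _))
        have h1 := pvRmax_le arr n j j2 (j2 - start + 1) (by omega) (by omega)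
          (fun i hi1 hi2 => hbound i hi1 (by omega))
        apply le_trans h1
        apply max_le
        · exact le_trans (by omega) (le_trans (le_max_right _ _) (le_max_left _ _))
        · exact le_max_right _ _
    · have hj2 : j2 = n - 1 := by omega
      rw [pvOuterF_stop arr n fuel _ ns2 ns2 j2 (by omega)]
      have hR : pvRmax arr n j = j2 - start + 1 := by
        apply le_antisymm
        · have h1 := pvRmax_le arr n j j2 (j2 - start + 1) (by omega) (by omega)
            (fun i hi1 hi2 => hbound i hi1 (by omega))
          have h2 : pvRmax arr n j2 = pvG arr n j2 := by
            rw [pvRmax, dif_neg (by omega)]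
          have h3 := hbound j2 (by omega) (le_refl _)
          rw [h2] at h1
          exact le_trans h1 (max_le (le_refl _) h3)
        · rw [← hpeak]
          exact pvRmax_ge arr n j1 j (by omega) (by omega)
      rw [hR]
      have heq : j2 - (start - 1) = j2 - start + 1 := by ring
      rw [heq]

-- ---- B side ----

theorem pv_xs_get (arr : List Int) (n i : Int) (hn : n ≤ arr.length)
    (h0 : 0 ≤ i) (hi : i < n) :
    PySem.List.pyGetD (PySem.List.slice arr none (some n)) i 0 = PySem.List.pyGetD arr i 0 := by
  rw [PySem.List.slice_to arr (by omega : (0:Int) ≤ n)]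
  rw [PySem.List.pyGetD_eq_getElem _ 0 h0 (by simp; omega),
      PySem.List.pyGetD_eq_getElem _ 0 h0 (by omega)]
  exact List.getElem_take

theorem pv_incList (arr : List Int) (n : Int) (hn : n ≤ arr.length) :
    ∀ m : Int, 1 ≤ m → m ≤ n →
    (PySem.List.pyRange 1 m 1).foldl
      (fun acc i =>
        acc ++ [if PySem.List.pyGetD (PySem.List.slice arr none (some n)) (i - 1) 0 ≤
                    PySem.List.pyGetD (PySem.List.slice arr none (some n)) i 0
                then PySem.List.pyGetD acc (-1) 0 + 1 else 1]) [1]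
      = (PySem.List.pyRange 0 m 1).map (fun i => pvInc arr i) := by
  intro m hm
  induction m, hm using Int.le_induction with
  | base =>
    intro _
    have e1 : PySem.List.pyRange (1:Int) 1 1 = [] := PySem.List.pyRange_one_eq_nil (by omega)
    have e2 : PySem.List.pyRange (0:Int) 1 1 = [0] := by
      have := PySem.List.pyRange_one_singleton (a := (0:Int))
      simpa using this
    rw [e1, e2]
    simp [pvInc_base arr 0 (by omega)]
  | succ m hm ihm =>
    intro hmn
    rw [PySem.List.pyRange_one_succ_right (by omega : (1:Int) ≤ m),
        List.foldl_append, ihm (by omega)]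
    have hsplit : PySem.List.pyRange (0:Int) (m + 1) 1 = PySem.List.pyRange 0 m 1 ++ [m] := by
      have := PySem.List.pyRange_one_succ_right (by omega : (0:Int) ≤ m)
      simpa using this
    rw [hsplit, List.map_append, List.foldl_cons, List.foldl_nil]
    have hsplit2 : PySem.List.pyRange (0:Int) m 1
        = PySem.List.pyRange 0 (m - 1) 1 ++ [m - 1] := by
      have := PySem.List.pyRange_one_succ_right (by omega : (0:Int) ≤ m - 1)
      rw [show m - 1 + 1 = m by ring] at this
      exact this
    have hlast : PySem.List.pyGetD ((PySem.List.pyRange 0 m 1).map (fun i => pvInc arr i)) (-1) 0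
        = pvInc arr (m - 1) := by
      rw [hsplit2]
      simp only [List.map_append, List.map_cons, List.map_nil]
      exact PySem.List.pyGetD_neg_one_append_singleton _ _ _
    rw [hlast]
    rw [pv_xs_get arr n (m - 1) hn (by omega) (by omega),
        pv_xs_get arr n m hn (by omega) (by omega)]
    have hstep : pvInc arr m = (if PySem.List.pyGetD arr (m - 1) 0 ≤ PySem.List.pyGetD arr m 0
        then pvInc arr (m - 1) + 1 else 1) := by
      rw [pvInc, dif_pos (by omega : (0:Int) < m)]
    rw [← hstep]
    simp

theorem pv_decList (arr : List Int) (n : Int) (hn : n ≤ arr.length) :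
    ∀ m : Int, 1 ≤ m → m ≤ n →
    (PySem.List.pyRange 1 m 1).foldl
      (fun acc i =>
        let j := n - 1 - i
        acc ++ [if PySem.List.pyGetD (PySem.List.slice arr none (some n)) j 0 ≥
                    PySem.List.pyGetD (PySem.List.slice arr none (some n)) (j + 1) 0
                then PySem.List.pyGetD acc (-1) 0 + 1 else 1]) [1]
      = (PySem.List.pyRange 0 m 1).map (fun i => pvDec arr n (n - 1 - i)) := by
  intro m hm
  induction m, hm using Int.le_induction with
  | base =>
    intro _
    have e1 : PySem.List.pyRange (1:Int) 1 1 = [] := PySem.List.pyRange_one_eq_nil (by omega)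
    have e2 : PySem.List.pyRange (0:Int) 1 1 = [0] := by
      have := PySem.List.pyRange_one_singleton (a := (0:Int))
      simpa using this
    rw [e1, e2]
    simp [pvDec_exit arr n (n - 1) (Or.inl (by omega))]
  | succ m hm ihm =>
    intro hmn
    rw [PySem.List.pyRange_one_succ_right (by omega : (1:Int) ≤ m),
        List.foldl_append, ihm (by omega)]
    have hsplit : PySem.List.pyRange (0:Int) (m + 1) 1 = PySem.List.pyRange 0 m 1 ++ [m] := by
      have := PySem.List.pyRange_one_succ_right (by omega : (0:Int) ≤ m)
      simpa using this
    rw [hsplit, List.map_append, List.foldl_cons, List.foldl_nil]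
    have hsplit2 : PySem.List.pyRange (0:Int) m 1
        = PySem.List.pyRange 0 (m - 1) 1 ++ [m - 1] := by
      have := PySem.List.pyRange_one_succ_right (by omega : (0:Int) ≤ m - 1)
      rw [show m - 1 + 1 = m by ring] at this
      exact this
    have hlast : PySem.List.pyGetD
        ((PySem.List.pyRange 0 m 1).map (fun i => pvDec arr n (n - 1 - i))) (-1) 0
        = pvDec arr n (n - 1 - (m - 1)) := by
      rw [hsplit2]
      simp only [List.map_append, List.map_cons, List.map_nil]
      exact PySem.List.pyGetD_neg_one_append_singleton _ _ _
    dsimp only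
    rw [hlast]
    rw [pv_xs_get arr n (n - 1 - m) hn (by omega) (by omega),
        pv_xs_get arr n (n - 1 - m + 1) hn (by omega) (by omega)]
    have hstep : pvDec arr n (n - 1 - m)
        = (if PySem.List.pyGetD arr (n - 1 - m) 0 ≥ PySem.List.pyGetD arr (n - 1 - m + 1) 0
           then pvDec arr n (n - 1 - (m - 1)) + 1 else 1) := by
      rw [pvDec, dif_pos (by omega : n - 1 - m < n - 1)]
      rw [show n - 1 - m + 1 = n - 1 - (m - 1) by ring]
    rw [← hstep]
    simp

theorem pv_dec_rev (arr : List Int) (n i : Int) (h0 : 0 ≤ i) (hi : i < n) :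
    PySem.List.pyGetD
      (((PySem.List.pyRange 0 n 1).map (fun t => pvDec arr n (n - 1 - t))).reverse) i 0
      = pvDec arr n i := by
  have hlen : (((PySem.List.pyRange 0 n 1).map (fun t => pvDec arr n (n - 1 - t))).reverse).length
      = n.toNat := by
    simp [PySem.List.length_pyRange_one]
  rw [PySem.List.pyGetD_eq_getElem _ 0 h0 (by omega)]
  rw [List.getElem_reverse]
  rw [List.getElem_map]
  rw [PySem.List.getElem_pyRange_one]
  congr 1
  simp only [List.length_map, PySem.List.length_pyRange_one] at *
  omega

theorem pv_foldmax (arr : List Int) (n j : Int) (hj : j ≤ n - 1) :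
    ∀ c, (PySem.List.pyRange j n 1).foldl (fun b i => max b (pvG arr n i)) c
      = max c (pvRmax arr n j) := by
  revert hj
  fun_induction pvRmax arr n j with
  | case1 j h ih =>
    intro hj c
    rw [PySem.List.pyRange_one_cons (by omega : j < n), List.foldl_cons,
        ih (by omega) (max c (pvG arr n j)), max_assoc]
  | case2 j h =>
    intro hj c
    rw [PySem.List.pyRange_one_cons (by omega : j < n),
        PySem.List.pyRange_one_eq_nil (by omega : n ≤ j + 1), List.foldl_cons, List.foldl_nil]

theorem pv_alt_eq (arr : List Int) (n : Int) (h1 : 1 ≤ n) (h2 : n ≤ arr.length) :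
    bitonic_alt arr n = max 1 (pvRmax arr n 0) := by
  have hne : (n == 0) = false := by simp; omega
  unfold bitonic_alt
  rw [hne]
  simp only [Bool.false_eq_true, if_false]
  rw [pv_incList arr n h2 n h1 (le_refl n), pv_decList arr n h2 n h1 (le_refl n)]
  have hbody : (PySem.List.pyRange 0 n 1).foldl
      (fun best i => max best
        (PySem.List.pyGetD ((PySem.List.pyRange 0 n 1).map (fun i => pvInc arr i)) i 0 +
         PySem.List.pyGetD
           (((PySem.List.pyRange 0 n 1).map (fun i => pvDec arr n (n - 1 - i))).reverse) i 0 - 1)) 1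
      = (PySem.List.pyRange 0 n 1).foldl (fun b i => max b (pvG arr n i)) 1 := by
    apply List.foldl_ext
    intro b x hx
    rw [PySem.List.mem_pyRange_one] at hx
    rw [PySem.List.pyGetD_map_pyRange_of_nonneg _ _ _ _ hx.1 hx.2,
        pv_dec_rev arr n x hx.1 hx.2]
    rfl
  rw [hbody, pv_foldmax arr n 0 (by omega) 1]

-- ===== VERDICT (by name: the statement is the Claim_ definition above) =====
theorem bitonic_spec : Claim_equal_bitonic := by
  intro arr n _ hpre
  unfold Spec_bitonic
  by_cases hz : n = 0
  · subst hz
    unfold bitonic bitonic_alt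
    rfl
  have hne : (n == 0) = false := by simp; omega
  rcases hpre with hlen | ⟨hnil, hone⟩
  · by_cases hneg : n < 0
    · -- n < 0: A's loop never runs (returns 1), B's ranges are empty (best stays 1)
      unfold bitonic bitonic_alt
      rw [hne]
      simp only [Bool.false_eq_true, if_false]
      rw [pvOuterF_stop arr n _ 1 0 0 0 (show ¬ (0:Int) < n - 1 by omega)]
      simp only [PySem.List.pyRange_one_eq_nil (show n ≤ (0:Int) by omega),
                 PySem.List.pyRange_one_eq_nil (show n ≤ (1:Int) by omega), List.foldl_nil]
    · -- 1 ≤ n ≤ len arr: the main equivalence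
      rw [pv_alt_eq arr n (by omega) hlen]
      unfold bitonic
      rw [hne]
      simp only [Bool.false_eq_true, if_false]
      by_cases h1 : n = 1
      · subst h1
        rw [pvOuterF_stop arr 1 _ 1 0 0 0 (by omega : ¬ (0:Int) < 1 - 1)]
        rw [pvRmax, dif_neg (by omega : ¬ (0:Int) < 1 - 1)]
        unfold pvG
        rw [pvInc_base arr 0 (le_refl 0), pvDec_exit arr 1 0 (Or.inl (by omega))]
        simp
      · rw [pvOuter_eq arr n (n - 1).toNat 1 0 0 (by omega) (le_refl 0) (le_refl 0) (by omega)
          (by rw [pvInc_base arr 0 (le_refl 0)]; norm_num)]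
  · -- arr = [], n = 1: A never indexes, both return 1
    subst hnil; subst hone
    decide
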